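-- pv_equiv track=rewrite | github.com/ElCubeh/FP1 | Especial/Ejercicios_semanales/SEMANA7/Máximos/number_functions.py | maxs
-- ===== SOURCE A (Python) =====
-- def maxs(list1, list2):
--     max_list = []
--     max_length = max(len(list1), len(list2))
--     for i in range(max_length):
--         max_val = -1
--         if i < len(list1):
--             max_val = max(max_val, list1[i])
--         if i < len(list2):
--             max_val = max(max_val, list2[i])
--         max_list.append(max_val)
--     return max_list
-- ===== SOURCE B (Python) =====
-- def maxs(list1, list2):
--     # Staged: handle the overlapping prefix and the leftover tail separately,
--     # then concatenate -- no index arithmetic, no padding/fill values.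
--     n = min(len(list1), len(list2))
--     head = [max(a, b, -1) for a, b in zip(list1, list2)]
--     tail = [max(x, -1) for x in list1[n:] + list2[n:]]
--     return head + tail
-- ===== Notes on version B (the rewrite author's own statement) =====
-- stated objective: alternative
-- what changed: Replaces the single indexed loop with per-index bounds checks by a staged decomposition: one pass zipping the common prefix, a second pass flooring the leftover tail of the longer list, then concatenation.
import Mathlib
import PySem

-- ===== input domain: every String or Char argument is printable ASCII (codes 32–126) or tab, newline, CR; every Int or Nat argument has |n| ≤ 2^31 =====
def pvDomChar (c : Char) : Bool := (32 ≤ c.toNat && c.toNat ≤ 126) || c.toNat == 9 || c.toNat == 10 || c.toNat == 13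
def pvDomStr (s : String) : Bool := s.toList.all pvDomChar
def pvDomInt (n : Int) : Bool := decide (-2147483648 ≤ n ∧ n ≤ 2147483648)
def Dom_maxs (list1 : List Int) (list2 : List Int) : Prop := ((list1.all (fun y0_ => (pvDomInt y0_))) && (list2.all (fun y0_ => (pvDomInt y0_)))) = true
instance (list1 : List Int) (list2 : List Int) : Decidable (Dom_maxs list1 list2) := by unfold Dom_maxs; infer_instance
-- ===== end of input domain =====

-- B restructures A's indexed loop into two staged passes (zipped common prefix, then the leftover tail) joined by append; same O(n) cost.

-- ===== PORT A =====
-- literal port: for i in range(max_length): max_val=-1; two bounds-checked maxes; append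
def maxs (list1 : List Int) (list2 : List Int) : List Int :=
  (List.range (max list1.length list2.length)).foldl
    (fun max_list i =>
      let v0 : Int := -1
      -- the `i < len(list1)` guard makes list1[i] in range: exact as getElem
      let v1 : Int := if h : i < list1.length then max v0 list1[i] else v0
      let v2 : Int := if h : i < list2.length then max v1 list2[i] else v1
      max_list ++ [v2]) []

-- ===== PORT B =====
-- staged: zip the common prefix, floor the leftover tail, concatenate.
-- list1[n:] with 0 ≤ n is exactly List.drop n.
def maxs_alt (list1 : List Int) (list2 : List Int) : List Int :=
  let n := min list1.length list2.length
  let head := (list1.zip list2).map (fun p => max (max p.1 p.2) (-1))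
  let tail := (list1.drop n ++ list2.drop n).map (fun x => max x (-1))
  head ++ tail

-- ===== PRECONDITION & SPEC =====
def Spec_maxs (list1 : List Int) (list2 : List Int) (out : List Int) : Prop := out = maxs_alt list1 list2
instance (list1 : List Int) (list2 : List Int) (out : List Int) : Decidable (Spec_maxs list1 list2 out) := by unfold Spec_maxs; infer_instance

-- ===== CLAIM =====
def Claim_equal_maxs : Prop := ∀ (list1 : List Int) (list2 : List Int), Dom_maxs list1 list2 → Spec_maxs list1 list2 (maxs list1 list2)

-- ===== LEMMAS AND PROOFS =====

-- folding "append one element" over a list builds the map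
theorem foldl_append_map {α β : Type} (f : α → β) (l : List α) (acc : List β) :
    l.foldl (fun a i => a ++ [f i]) acc = acc ++ l.map f := by
  induction l generalizing acc with
  | nil => simp
  | cons x xs ih => simp [List.foldl, ih]

def stepF (list1 list2 : List Int) (i : ℕ) : Int :=
  let v0 : Int := -1
  let v1 : Int := if h : i < list1.length then max v0 list1[i] else v0
  if h : i < list2.length then max v1 list2[i] else v1

theorem stepF_succ (a : Int) (as_ : List Int) (b : Int) (bs : List Int) :
    stepF (a :: as_) (b :: bs) ∘ Nat.succ = stepF as_ bs := by
  funext i; simp [stepF, Function.comp]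

theorem stepF_succ_left (a : Int) (as_ : List Int) :
    stepF (a :: as_) [] ∘ Nat.succ = stepF as_ [] := by
  funext i; simp [stepF, Function.comp]

theorem stepF_succ_right (b : Int) (bs : List Int) :
    stepF [] (b :: bs) ∘ Nat.succ = stepF [] bs := by
  funext i; simp [stepF, Function.comp]

theorem map_range_eq_alt (list1 list2 : List Int) :
    (List.range (max list1.length list2.length)).map (stepF list1 list2)
      = maxs_alt list1 list2 := by
  induction list1 generalizing list2 with
  | nil =>
    induction list2 with
    | nil => simp [maxs_alt]
    | cons b bs ih2 =>
      simp only [List.length_nil, List.length_cons, Nat.zero_max] at *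
      rw [List.range_succ_eq_map, List.map_cons, List.map_map, stepF_succ_right, ih2]
      simp [maxs_alt, stepF, max_comm]
  | cons a as_ ih =>
    cases list2 with
    | nil =>
      simp only [List.length_cons, List.length_nil, Nat.max_zero]
      rw [List.range_succ_eq_map, List.map_cons, List.map_map, stepF_succ_left]
      have h0 := ih ([] : List Int)
      simp only [List.length_nil, Nat.max_zero] at h0
      rw [h0]
      simp [maxs_alt, stepF, max_comm]
    | cons b bs =>
      simp only [List.length_cons, Nat.succ_max_succ]
      rw [List.range_succ_eq_map, List.map_cons, List.map_map, stepF_succ, ih bs]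
      simp only [maxs_alt, List.zip_cons_cons, List.map_cons, List.length_cons,
        Nat.succ_min_succ, List.drop_succ_cons]
      refine congrArg₂ List.cons ?_ rfl
      simp [stepF, Int.max_def]
      omega

-- ===== VERDICT =====
theorem maxs_spec : Claim_equal_maxs := by
  intro list1 list2 _
  show maxs list1 list2 = maxs_alt list1 list2
  unfold maxs
  exact (foldl_append_map (stepF list1 list2) _ []).trans
    (by simpa using map_range_eq_alt list1 list2)
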